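-- pv_equiv track=rewrite | github.com/roytian1992/NarrativeKnowledgeWeaver | core/builder/narrative_graph_builder.py | _is_contiguous_subchain
-- ===== SOURCE A (Python) =====
-- from typing import Any, Dict, List, Optional, Set, Tuple
--
-- def _is_contiguous_subchain(sub: List[str], full: List[str]) -> bool:
--     n, m = len(sub), len(full)
--     if n == 0 or n > m:
--         return False
--     for i in range(m - n + 1):
--         if full[i : i + n] == sub:
--             return True
--     return False
-- ===== SOURCE B (Python) =====
-- from typing import List
--
-- _P = 1000000007
-- _B = 131
--
-- def _tok_hash(s: str) -> int:
--     h = 0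
--     for c in s:
--         h = (h * 257 + ord(c)) % _P
--     return h
--
-- def _is_contiguous_subchain(sub: List[str], full: List[str]) -> bool:
--     # Rabin-Karp: rolling window hash over token hashes, verify on hash hit.
--     n, m = len(sub), len(full)
--     if n == 0 or n > m:
--         return False
--     ts = [_tok_hash(s) for s in sub]
--     tf = [_tok_hash(s) for s in full]
--     target = 0
--     for x in ts:
--         target = (target * _B + x) % _P
--     h = 0
--     for x in tf[:n]:
--         h = (h * _B + x) % _P
--     pw = pow(_B, n - 1, _P)
--     for i in range(m - n + 1):
--         if h == target and full[i:i + n] == sub: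
--             return True
--         if i + n < m:
--             h = ((h - tf[i] * pw) * _B + tf[i + n]) % _P
--     return False
-- ===== Notes on version B (the rewrite author's own statement) =====
-- stated objective: alternative
-- what changed: Replaced the naive slice-and-compare scan with Rabin-Karp: a rolling polynomial hash over token hashes selects candidate offsets and a direct comparison verifies each hash hit.
import Mathlib
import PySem

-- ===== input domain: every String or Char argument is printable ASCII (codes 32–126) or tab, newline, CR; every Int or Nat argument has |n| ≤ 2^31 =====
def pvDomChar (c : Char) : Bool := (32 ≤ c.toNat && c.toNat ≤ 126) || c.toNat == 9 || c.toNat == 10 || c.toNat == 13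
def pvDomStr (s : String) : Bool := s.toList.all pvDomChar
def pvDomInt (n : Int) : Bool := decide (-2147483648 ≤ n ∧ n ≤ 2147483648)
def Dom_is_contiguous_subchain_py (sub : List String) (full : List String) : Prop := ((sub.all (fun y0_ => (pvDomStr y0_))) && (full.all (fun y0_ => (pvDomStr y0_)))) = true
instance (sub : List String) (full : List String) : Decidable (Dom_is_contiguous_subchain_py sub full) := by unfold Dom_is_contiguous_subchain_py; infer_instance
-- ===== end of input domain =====

-- B replaces A's naive slice-and-compare scan by Rabin-Karp (rolling hash + verification);
-- same results on all inputs, different algorithm (objective: alternative).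

-- ===== PORT A =====
-- 'for i in range(m - n + 1): if full[i:i+n] == sub: return True' as recursion over the range list
def aScan (sub : List String) (full : List String) (n : Int) : List Int → Bool
  | [] => false
  | i :: rest =>
    if PySem.List.slice full (some i) (some (i + n)) = sub then true
    else aScan sub full n rest

def is_contiguous_subchain_py (sub : List String) (full : List String) : Bool :=
  let n : Int := sub.length
  let m : Int := full.length
  if n = 0 ∨ n > m then false
  else aScan sub full n (PySem.List.pyRange 0 (m - n + 1) 1)

-- ===== PORT B =====
def rkP : Int := 1000000007
def rkB : Int := 131

-- _tok_hash: per-character polynomial hash mod rkP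
def tokHash (s : String) : Int :=
  s.toList.foldl (fun h c => PySem.Int.mod (h * 257 + (c.toNat : Int)) rkP) 0

-- one step 'h = (h * _B + x) % _P'
def hStep (h x : Int) : Int := PySem.Int.mod (h * rkB + x) rkP

-- main Rabin-Karp loop over the range list, carrying the rolling window hash h;
-- tf is always indexed in range here, so pyGet?.getD 0 computes exactly Python's tf[i]
def rkLoop (sub : List String) (full : List String) (tf : List Int)
    (target pw : Int) (n m : Int) : List Int → Int → Bool
  | [], _ => false
  | i :: rest, h =>
    if h = target ∧ PySem.List.slice full (some i) (some (i + n)) = sub then true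
    else
      rkLoop sub full tf target pw n m rest
        (if i + n < m then
           PySem.Int.mod ((h - ((PySem.List.pyGet? tf i).getD 0) * pw) * rkB
             + ((PySem.List.pyGet? tf (i + n)).getD 0)) rkP
         else h)

def is_contiguous_subchain_py_alt (sub : List String) (full : List String) : Bool :=
  let n : Int := sub.length
  let m : Int := full.length
  if n = 0 ∨ n > m then false
  else
    let ts := sub.map tokHash
    let tf := full.map tokHash
    let target := ts.foldl hStep 0
    let h0 := (PySem.List.slice tf none (some n)).foldl hStep 0
    let pw := PySem.Int.powMod rkB (sub.length - 1) rkP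
    rkLoop sub full tf target pw n m (PySem.List.pyRange 0 (m - n + 1) 1) h0

-- ===== PRECONDITION & SPEC =====
def Spec_is_contiguous_subchain_py (sub : List String) (full : List String) (out : Bool) : Prop := out = is_contiguous_subchain_py_alt sub full
instance (sub : List String) (full : List String) (out : Bool) : Decidable (Spec_is_contiguous_subchain_py sub full out) := by unfold Spec_is_contiguous_subchain_py; infer_instance

-- ===== CLAIM (what is proved, stated in full; the proofs are below) =====
def Claim_equal_is_contiguous_subchain_py : Prop := ∀ (sub : List String) (full : List String), Dom_is_contiguous_subchain_py sub full → Spec_is_contiguous_subchain_py sub full (is_contiguous_subchain_py sub full)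

-- ===== LEMMAS AND PROOFS =====

-- the unreduced polynomial value of a window
def rkPoly (l : List Int) : Int := l.foldl (fun a x => a * rkB + x) 0

lemma rkP_pos : (0 : Int) < rkP := by decide

lemma mod_step (a x : Int) :
    PySem.Int.mod (PySem.Int.mod a rkP * rkB + x) rkP = PySem.Int.mod (a * rkB + x) rkP := by
  rw [PySem.Int.mod_eq_emod_of_pos rkP_pos, PySem.Int.mod_eq_emod_of_pos rkP_pos,
      PySem.Int.mod_eq_emod_of_pos rkP_pos]
  have h1 : Int.ModEq rkP (a % rkP) a := Int.emod_emod a rkP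
  exact (h1.mul_right rkB).add_right x

lemma hStep_fold_mod (l : List Int) (a : Int) :
    l.foldl hStep (PySem.Int.mod a rkP) = PySem.Int.mod (l.foldl (fun a x => a * rkB + x) a) rkP := by
  induction l generalizing a with
  | nil => simp
  | cons x l ih =>
    simp only [List.foldl_cons, hStep, mod_step]
    exact ih (a * rkB + x)

lemma hashL_eq (l : List Int) : l.foldl hStep 0 = PySem.Int.mod (rkPoly l) rkP := by
  have h0 : PySem.Int.mod 0 rkP = 0 := by rw [PySem.Int.mod_eq_emod_of_pos rkP_pos]; simp
  calc l.foldl hStep 0 = l.foldl hStep (PySem.Int.mod 0 rkP) := by rw [h0]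
    _ = PySem.Int.mod (rkPoly l) rkP := hStep_fold_mod l 0

lemma rkPoly_from (l : List Int) (a : Int) :
    l.foldl (fun a x => a * rkB + x) a = a * rkB ^ l.length + rkPoly l := by
  induction l generalizing a with
  | nil => simp [rkPoly]
  | cons x l ih =>
    simp only [rkPoly, List.foldl_cons, List.length_cons] at *
    rw [ih (a * rkB + x), ih (0 * rkB + x)]
    ring

-- rolling identity on windows
lemma rkPoly_roll (x y : Int) (t : List Int) :
    rkPoly (t ++ [y]) = (rkPoly (x :: t) - x * rkB ^ t.length) * rkB + y := by
  have h1 : rkPoly (t ++ [y]) = rkPoly t * rkB + y := by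
    simp only [rkPoly, List.foldl_append, List.foldl_cons, List.foldl_nil]
  have h2 : rkPoly (x :: t) = x * rkB ^ t.length + rkPoly t := by
    simp only [rkPoly, List.foldl_cons]
    rw [rkPoly_from, rkPoly_from]
    ring
  rw [h1, h2]; ring

-- window of tf is the token-hash image of the window of full
lemma window_map (full : List String) (j n : Nat) :
    ((full.map tokHash).drop j).take n = (((full.drop j).take n).map tokHash) := by
  rw [List.map_take, List.map_drop]

-- the rolling-hash update is exact on windows
lemma roll_update (full : List String) (n j : Nat) (hn : 0 < n)
    (hlt : j < full.length - n) (hnm : n ≤ full.length) :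
    PySem.Int.mod
      ((PySem.Int.mod (rkPoly (((full.map tokHash).drop j).take n)) rkP
          - ((PySem.List.pyGet? (full.map tokHash) (j : Int)).getD 0) * PySem.Int.powMod rkB (n - 1) rkP) * rkB
        + ((PySem.List.pyGet? (full.map tokHash) ((j : Int) + (n : Int))).getD 0)) rkP
    = PySem.Int.mod (rkPoly (((full.map tokHash).drop (j + 1)).take n)) rkP := by
  obtain ⟨n', rfl⟩ : ∃ n', n = n' + 1 := ⟨n - 1, by omega⟩
  set tf := full.map tokHash with htf
  have hmlen : tf.length = full.length := by simp [htf]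
  have hjlt : j < tf.length := by omega
  have hjn : j + (n' + 1) < tf.length := by omega
  -- the two indexings
  have hx : (PySem.List.pyGet? tf (j : Int)).getD 0 = tf[j] := by
    rw [PySem.List.pyGet?_natCast]
    simp [List.getElem?_eq_getElem hjlt]
  have hcast : ((j : Int) + ((n' + 1 : Nat) : Int)) = ((j + (n' + 1) : Nat) : Int) := by push_cast; ring
  have hy : (PySem.List.pyGet? tf ((j : Int) + ((n' + 1 : Nat) : Int))).getD 0 = tf[j + (n' + 1)] := by
    rw [hcast, PySem.List.pyGet?_natCast]
    simp [List.getElem?_eq_getElem hjn]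
  set t : List Int := (tf.drop (j + 1)).take n' with ht
  have hlent : t.length = n' := by
    simp only [ht, List.length_take, List.length_drop]
    omega
  have hW1 : (tf.drop j).take (n' + 1) = tf[j] :: t := by
    rw [List.drop_eq_getElem_cons hjlt, List.take_succ_cons]
  have hn'lt : n' < (tf.drop (j + 1)).length := by simp; omega
  have hW2 : (tf.drop (j + 1)).take (n' + 1) = t ++ [tf[j + (n' + 1)]] := by
    rw [List.take_succ_eq_append_getElem hn'lt, ht]
    rw [List.getElem_drop]
    simp only [show j + 1 + n' = j + (n' + 1) from by omega]
  have hpoly : rkPoly ((tf.drop (j + 1)).take (n' + 1))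
      = (rkPoly ((tf.drop j).take (n' + 1)) - tf[j] * rkB ^ n') * rkB + tf[j + (n' + 1)] := by
    rw [hW1, hW2, rkPoly_roll tf[j] tf[j + (n' + 1)] t, hlent]
  rw [hx, hy, hpoly]
  rw [PySem.Int.powMod_eq_emod _ _ rkP_pos]
  rw [PySem.Int.mod_eq_emod_of_pos rkP_pos, PySem.Int.mod_eq_emod_of_pos rkP_pos,
      PySem.Int.mod_eq_emod_of_pos rkP_pos]
  have hA : Int.ModEq rkP (rkPoly ((tf.drop j).take (n' + 1)) % rkP) (rkPoly ((tf.drop j).take (n' + 1))) :=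
    Int.emod_emod _ rkP
  have hB : Int.ModEq rkP (rkB ^ (n' + 1 - 1) % rkP) (rkB ^ n') :=
    Int.emod_emod (rkB ^ n') rkP
  exact (((hA.sub ((Int.ModEq.refl tf[j]).mul hB)).mul_right rkB).add_right _)

-- A's scan is an 'any' over the range list
lemma aScan_any (sub full : List String) (n : Int) (l : List Int) :
    aScan sub full n l = l.any (fun i => PySem.List.slice full (some i) (some (i + n)) = sub) := by
  induction l with
  | nil => simp [aScan]
  | cons i rest ih =>
    simp only [aScan, List.any_cons, ih]
    by_cases hc : PySem.List.slice full (some i) (some (i + n)) = sub <;> simp [hc]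

-- if the window at j literally equals sub, the rolling hash equals the target hash
lemma hash_of_match (sub full : List String) (n j : Nat)
    (hs : (full.drop j).take n = sub) :
    PySem.Int.mod (rkPoly (((full.map tokHash).drop j).take n)) rkP
      = (sub.map tokHash).foldl hStep 0 := by
  rw [hashL_eq, window_map, hs]

-- the main loop invariant, by induction on the number of remaining iterations
lemma rkLoop_aux (sub full : List String) (n : Nat) (hn : 0 < n) (hnm : n ≤ full.length) :
    ∀ (K j : Nat) (h : Int), j + K = full.length - n + 1 →
      h = PySem.Int.mod (rkPoly (((full.map tokHash).drop j).take n)) rkP →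
      (rkLoop sub full (full.map tokHash) ((sub.map tokHash).foldl hStep 0)
          (PySem.Int.powMod rkB (n - 1) rkP) (n : Int) (full.length : Int)
          (PySem.List.pyRange (j : Int) ((full.length : Int) - (n : Int) + 1) 1) h = true ↔
        ∃ jj : Nat, j ≤ jj ∧ jj ≤ full.length - n ∧ (full.drop jj).take n = sub) := by
  have key : ((full.length : Int) - (n : Int) + 1) = ((full.length - n + 1 : Nat) : Int) := by omega
  intro K
  induction K with
  | zero =>
    intro j h hK hh
    rw [key, PySem.List.pyRange_one_eq_nil (by exact_mod_cast by omega)]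
    simp only [rkLoop]
    constructor
    · intro hfalse; cases hfalse
    · rintro ⟨jj, h1, h2, _⟩; omega
  | succ K ih =>
    intro j h hK hh
    have hjM : j ≤ full.length - n := by omega
    rw [key, PySem.List.pyRange_one_cons (by exact_mod_cast by omega)]
    rw [← key]
    simp only [rkLoop]
    have hslice : PySem.List.slice full (some (j : Int)) (some ((j : Int) + (n : Int)))
        = (full.drop j).take n := PySem.List.slice_natCast_add full j n
    by_cases hc : h = (sub.map tokHash).foldl hStep 0 ∧
        PySem.List.slice full (some (j : Int)) (some ((j : Int) + (n : Int))) = sub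
    · rw [if_pos hc]
      simp only [true_iff]
      exact ⟨j, le_refl j, hjM, by rw [← hslice]; exact hc.2⟩
    · rw [if_neg hc]
      -- the window at j does not match: otherwise the hash would equal the target too
      have hnomatch : ¬ ((full.drop j).take n = sub) := by
        intro hs
        exact hc ⟨by rw [hh]; exact hash_of_match sub full n j hs, by rw [hslice]; exact hs⟩
      have hcast1 : ((j : Int) + 1) = ((j + 1 : Nat) : Int) := by push_cast; ring
      by_cases hlt : j < full.length - n
      · have hguard : (j : Int) + (n : Int) < (full.length : Int) := by omega
        rw [if_pos hguard, hcast1, ih (j + 1) _ (by omega) (by rw [hh]; exact roll_update full n j hn hlt hnm)]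
        constructor
        · rintro ⟨jj, h1, h2, h3⟩; exact ⟨jj, by omega, h2, h3⟩
        · rintro ⟨jj, h1, h2, h3⟩
          refine ⟨jj, by_contra fun hcon => ?_, h2, h3⟩
          have : jj = j := by omega
          exact hnomatch (this ▸ h3)
      · have hj_eq : j = full.length - n := by omega
        have hguard : ¬ ((j : Int) + (n : Int) < (full.length : Int)) := by omega
        rw [if_neg hguard, hcast1, key,
            PySem.List.pyRange_one_eq_nil (by exact_mod_cast by omega)]
        simp only [rkLoop]
        constructor
        · intro hfalse; cases hfalse
        · rintro ⟨jj, h1, h2, h3⟩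
          have : jj = j := by omega
          exact absurd (this ▸ h3) hnomatch

-- ===== VERDICT (by name: the statement is the Claim_ definition above) =====
theorem is_contiguous_subchain_py_spec : Claim_equal_is_contiguous_subchain_py := by
  intro sub full _
  unfold Spec_is_contiguous_subchain_py
  unfold is_contiguous_subchain_py is_contiguous_subchain_py_alt
  by_cases h0 : (sub.length : Int) = 0 ∨ (sub.length : Int) > (full.length : Int)
  · simp only [h0, if_true]
  · simp only [h0, if_false]
    have hn : 0 < sub.length := by omega
    have hnm : sub.length ≤ full.length := by omega
    -- B's initial hash is the hash of the first window
    have hinit : (PySem.List.slice (full.map tokHash) none (some (sub.length : Int))).foldl hStep 0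
        = PySem.Int.mod (rkPoly (((full.map tokHash).drop 0).take sub.length)) rkP := by
      rw [PySem.List.slice_to_natCast, hashL_eq, List.drop_zero]
    have hB := rkLoop_aux sub full sub.length hn hnm (full.length - sub.length + 1) 0
      ((PySem.List.slice (full.map tokHash) none (some (sub.length : Int))).foldl hStep 0)
      (by omega) hinit
    simp only [Nat.cast_zero] at hB
    -- A's scan is the same existential
    have hA : aScan sub full (sub.length : Int)
        (PySem.List.pyRange 0 ((full.length : Int) - (sub.length : Int) + 1) 1) = true ↔
        ∃ jj : Nat, 0 ≤ jj ∧ jj ≤ full.length - sub.length ∧ (full.drop jj).take sub.length = sub := by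
      rw [aScan_any]
      simp only [List.any_eq_true, PySem.List.mem_pyRange_one, decide_eq_true_eq]
      constructor
      · rintro ⟨i, ⟨hi0, hiK⟩, hs⟩
        refine ⟨i.toNat, by omega, by omega, ?_⟩
        have hcast : i = ((i.toNat : Nat) : Int) := by omega
        rw [hcast, PySem.List.slice_natCast_add] at hs
        exact hs
      · rintro ⟨jj, _, hjj, hs⟩
        refine ⟨(jj : Int), ⟨by omega, by omega⟩, ?_⟩
        rw [PySem.List.slice_natCast_add]
        exact hs
    rw [Bool.eq_iff_iff]
    exact hA.trans hB.symm
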